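-- pv_equiv track=rewrite | github.com/radlessss/Olesia-Raduchych | OLE/main.py | calculate_service_time
-- ===== SOURCE A (Python) =====
-- import heapq
--
-- def calculate_service_time(n, k, t):
--     queue = []
--     time = 0
--
--     for i in range(k):
--         heapq.heappush(queue, (0, i))
--
--     for i in range(n):
--         service_time, cash_register = heapq.heappop(queue)
--         service_time += t[i]
--         time = max(time, service_time)
--         heapq.heappush(queue, (service_time, cash_register))
--
--     return time
-- ===== SOURCE B (Python) =====
-- def calculate_service_time(n, k, t):
--     loads = [0] * k
--     time = 0
--     for i in range(n):
--         best = None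
--         best_idx = -1
--         for j, x in enumerate(loads):
--             if best is None or x < best:
--                 best = x
--                 best_idx = j
--         loads[best_idx] += t[i]
--         if loads[best_idx] > time:
--             time = loads[best_idx]
--     return time
-- ===== Notes on version B (the rewrite author's own statement) =====
-- stated objective: simpler
-- what changed: Replaced the heapq priority queue by a plain per-register loads list with an explicit linear min-scan per customer, tracking the running maximum directly.
import Mathlib
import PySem

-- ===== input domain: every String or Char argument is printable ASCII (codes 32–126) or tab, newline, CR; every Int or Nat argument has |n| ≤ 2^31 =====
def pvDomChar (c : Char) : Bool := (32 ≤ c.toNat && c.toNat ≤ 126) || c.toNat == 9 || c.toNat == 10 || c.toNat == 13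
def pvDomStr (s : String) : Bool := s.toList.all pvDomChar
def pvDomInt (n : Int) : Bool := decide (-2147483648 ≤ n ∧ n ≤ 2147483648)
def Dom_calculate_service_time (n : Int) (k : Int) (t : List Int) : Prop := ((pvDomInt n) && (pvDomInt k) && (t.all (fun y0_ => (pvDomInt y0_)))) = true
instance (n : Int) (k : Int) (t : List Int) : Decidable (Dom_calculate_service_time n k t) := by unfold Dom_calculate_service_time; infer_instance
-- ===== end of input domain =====

-- B replaces the heap by a plain loads array with a linear min-scan per customer: simpler code, no heap machinery.


-- ===== PORT A =====
-- heapq is modelled at its library contract: the heap is the list of its elements; heappush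
-- appends; heappop removes the least element in Python's tuple (lexicographic) order — exact,
-- because heappop always returns the minimum and here the pairs are pairwise distinct
-- (distinct register ids), so the popped VALUE is determined by the multiset alone.
def pvLexMin (a b : Int × Int) : Int × Int :=
  if a.1 < b.1 ∨ (a.1 = b.1 ∧ a.2 ≤ b.2) then a else b

def pvHeapPop (q : List (Int × Int)) : Option ((Int × Int) × List (Int × Int)) :=
  match q with
  | [] => none                                   -- heappop([]) : IndexError
  | x :: xs =>
    let m := xs.foldl pvLexMin x
    some (m, (x :: xs).erase m)

-- one iteration of A's main loop; `none` = an exception has been raised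
def pvAStep (t : List Int) (st : Option (List (Int × Int) × Int)) (i : Int) :
    Option (List (Int × Int) × Int) :=
  match st with
  | none => none
  | some (q, time) =>
    match pvHeapPop q, PySem.List.pyGet? t i with
    | some (m, q'), some ti =>
        let s := m.1 + ti
        some (q' ++ [(s, m.2)], max time s)
    | _, _ => none

def calculate_service_time (n : Int) (k : Int) (t : List Int) : Int :=
  match (PySem.List.pyRange 0 n 1).foldl (pvAStep t)
      (some ((PySem.List.pyRange 0 k 1).foldl (fun q i => q ++ [((0 : Int), i)]) [], 0)) with
  | some (_, time) => time
  | none => 0                                    -- unreachable under Pre_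

-- ===== PORT B =====
-- `for j, x in enumerate(loads): if best is None or x < best: best, best_idx = x, j`
def pvScan : List Int → Int → Option Int × Int → Option Int × Int
  | [], _, st => st
  | x :: xs, j, (best, bi) =>
    match best with
    | none => pvScan xs (j + 1) (some x, j)
    | some b => if x < b then pvScan xs (j + 1) (some x, j) else pvScan xs (j + 1) (some b, bi)

def pvBStep (t : List Int) (st : Option (List Int × Int)) (i : Int) :
    Option (List Int × Int) :=
  match st with
  | none => none
  | some (loads, time) =>
    let bi := (pvScan loads 0 (none, -1)).2
    match PySem.List.pyGet? loads bi, PySem.List.pyGet? t i with   -- loads[bi] += t[i]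
    | some v, some ti =>
        let nv := v + ti
        some (PySem.List.pySetD loads bi nv, if nv > time then nv else time)
    | _, _ => none

def calculate_service_time_alt (n : Int) (k : Int) (t : List Int) : Int :=
  -- loads = [0] * k
  match (PySem.List.pyRange 0 n 1).foldl (pvBStep t) (some (List.replicate k.toNat 0, 0)) with
  | some (_, time) => time
  | none => 0                                    -- unreachable under Pre_

-- ===== PRECONDITION & SPEC =====
-- Pre_ excludes exactly the inputs where Python A raises IndexError: a customer with no
-- register (0 < n with k ≤ 0, heappop of an empty heap) or fewer entries in t than n (t[i]).
def Pre_calculate_service_time (n : Int) (k : Int) (t : List Int) : Prop :=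
  (0 < n → 0 < k) ∧ n ≤ (t.length : Int)
instance (n : Int) (k : Int) (t : List Int) : Decidable (Pre_calculate_service_time n k t) := by
  unfold Pre_calculate_service_time; infer_instance

def pvWitness_calculate_service_time : Int × Int × List Int := (3, 2, [5, 1, 4])

def Spec_calculate_service_time (n : Int) (k : Int) (t : List Int) (out : Int) : Prop := out = calculate_service_time_alt n k t
instance (n : Int) (k : Int) (t : List Int) (out : Int) : Decidable (Spec_calculate_service_time n k t out) := by unfold Spec_calculate_service_time; infer_instance

-- ===== CLAIM (what is proved, stated in full; the proofs are below) =====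
def Claim_equal_calculate_service_time : Prop := ∀ (n : Int) (k : Int) (t : List Int), Dom_calculate_service_time n k t → Pre_calculate_service_time n k t → Spec_calculate_service_time n k t (calculate_service_time n k t)

-- ===== LEMMAS AND PROOFS =====

-- Python's lexicographic order on the (service_time, register) pairs
def pvLe (a b : Int × Int) : Prop := a.1 < b.1 ∨ (a.1 = b.1 ∧ a.2 ≤ b.2)

theorem pvLe_refl (a : Int × Int) : pvLe a a := by unfold pvLe; omega

theorem pvLe_trans {a b c : Int × Int} (h1 : pvLe a b) (h2 : pvLe b c) : pvLe a c := by
  unfold pvLe at *; omega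

theorem pvLe_antisymm {a b : Int × Int} (h1 : pvLe a b) (h2 : pvLe b a) : a = b := by
  unfold pvLe at *
  have : a.1 = b.1 ∧ a.2 = b.2 := by omega
  exact Prod.ext this.1 this.2

theorem pvLexMin_le_left (a b : Int × Int) : pvLe (pvLexMin a b) a := by
  unfold pvLexMin; split <;> unfold pvLe at * <;> omega

theorem pvLexMin_le_right (a b : Int × Int) : pvLe (pvLexMin a b) b := by
  unfold pvLexMin; split <;> unfold pvLe at * <;> omega

theorem pvLexMin_cases (a b : Int × Int) : pvLexMin a b = a ∨ pvLexMin a b = b := by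
  unfold pvLexMin; split <;> simp

theorem pvFoldlMin_spec (x : Int × Int) (xs : List (Int × Int)) :
    xs.foldl pvLexMin x ∈ x :: xs ∧ ∀ y ∈ x :: xs, pvLe (xs.foldl pvLexMin x) y := by
  induction xs generalizing x with
  | nil =>
    refine ⟨List.mem_singleton.mpr rfl, ?_⟩
    intro y hy
    rw [List.mem_singleton.mp hy]
    exact pvLe_refl _
  | cons z zs ih =>
    have ⟨hmem, hle⟩ := ih (pvLexMin x z)
    simp only [List.foldl_cons]
    constructor
    · rcases List.mem_cons.mp hmem with h | h
      · rcases pvLexMin_cases x z with hc | hc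
        · rw [h, hc]; exact List.mem_cons_self ..
        · rw [h, hc]; exact List.mem_cons_of_mem _ (List.mem_cons_self ..)
      · exact List.mem_cons_of_mem _ (List.mem_cons_of_mem _ h)
    · intro y hy
      have hm := hle _ (List.mem_cons_self ..)
      rcases List.mem_cons.mp hy with hy1 | hy'
      · rw [hy1]; exact pvLe_trans hm (pvLexMin_le_left _ _)
      rcases List.mem_cons.mp hy' with hy2 | hy''
      · rw [hy2]; exact pvLe_trans hm (pvLexMin_le_right _ _)
      · exact hle _ (List.mem_cons_of_mem _ hy'')

-- the (load, register-id) pairs that A's heap mirrors, ids counted from c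
def pvPairs (c : Int) : List Int → List (Int × Int)
  | [] => []
  | x :: xs => (x, c) :: pvPairs (c + 1) xs

theorem mem_pvPairs {c : Int} {l : List Int} {p : Int × Int} :
    p ∈ pvPairs c l ↔ ∃ (kk : Nat) (_ : kk < l.length), p = (l[kk], c + kk) := by
  induction l generalizing c with
  | nil => simp [pvPairs]
  | cons x xs ih =>
    simp only [pvPairs, List.mem_cons, ih]
    constructor
    · rintro (rfl | ⟨kk, hkk, rfl⟩)
      · exact ⟨0, by simp, by simp⟩
      · exact ⟨kk + 1, by simpa using hkk, by simp; ring_nf⟩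
    · rintro ⟨kk, hkk, rfl⟩
      cases kk with
      | zero => left; simp
      | succ m => right; exact ⟨m, by simpa using hkk, by simp; ring_nf⟩

theorem pvScan_some (l : List Int) (c b bi : Int) (hbi : bi < c) :
    ∃ b' bi', pvScan l c (some b, bi) = (some b', bi') ∧
      ((b', bi') = (b, bi) ∨ (b', bi') ∈ pvPairs c l) ∧
      pvLe (b', bi') (b, bi) ∧ (∀ y ∈ pvPairs c l, pvLe (b', bi') y) ∧ bi' < c + l.length := by
  induction l generalizing c b bi with
  | nil =>
    exact ⟨b, bi, rfl, Or.inl rfl, pvLe_refl _, by simp [pvPairs], by simpa using hbi⟩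
  | cons x xs ih =>
    simp only [pvScan]
    by_cases hx : x < b
    · rw [if_pos hx]
      obtain ⟨b', bi', heq, hmem, hle, hall, hlt⟩ := ih (c + 1) x c (by omega)
      refine ⟨b', bi', heq, ?_, ?_, ?_, by simp; omega⟩
      · rcases hmem with h | h
        · right; rw [h]; simp [pvPairs]
        · right; exact List.mem_cons_of_mem _ h
      · exact pvLe_trans hle (by unfold pvLe; simp; omega)
      · intro y hy
        rcases List.mem_cons.mp hy with rfl | hy'
        · exact hle
        · exact hall _ hy'
    · rw [if_neg hx]
      obtain ⟨b', bi', heq, hmem, hle, hall, hlt⟩ := ih (c + 1) b bi (by omega)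
      refine ⟨b', bi', heq, ?_, hle, ?_, by simp; omega⟩
      · rcases hmem with h | h
        · exact Or.inl h
        · exact Or.inr (List.mem_cons_of_mem _ h)
      · intro y hy
        rcases List.mem_cons.mp hy with rfl | hy'
        · exact pvLe_trans hle (by unfold pvLe; simp; omega)
        · exact hall _ hy'

theorem pvScan_spec (x : Int) (xs : List Int) :
    ∃ b' bi', pvScan (x :: xs) 0 (none, -1) = (some b', bi') ∧
      (b', bi') ∈ pvPairs 0 (x :: xs) ∧ ∀ y ∈ pvPairs 0 (x :: xs), pvLe (b', bi') y := by
  have h := pvScan_some xs 1 x 0 (by omega)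
  obtain ⟨b', bi', heq, hmem, hle, hall, _⟩ := h
  refine ⟨b', bi', by simp [pvScan, heq], ?_, ?_⟩
  · rcases hmem with h | h
    · rw [h]; simp [pvPairs]
    · exact List.mem_cons_of_mem _ h
  · intro y hy
    rcases List.mem_cons.mp hy with rfl | hy'
    · exact hle
    · exact hall _ hy'

theorem pvPairs_set_perm (l : List Int) (c : Int) (kk : Nat) (v : Int) (h : kk < l.length) :
    (pvPairs c (l.set kk v)).Perm ((v, c + kk) :: (pvPairs c l).erase (l[kk], c + kk)) := by
  induction l generalizing c kk with
  | nil => simp at h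
  | cons x xs ih =>
    cases kk with
    | zero =>
      simp only [List.set_cons_zero, pvPairs, List.getElem_cons_zero, Nat.cast_zero, add_zero]
      rw [List.erase_cons_head]
    | succ m =>
      have hm : m < xs.length := by simpa using h
      simp only [List.set_cons_succ, pvPairs, List.getElem_cons_succ]
      have hne : ¬ (((x, c) : Int × Int) == (xs[m], c + ((m + 1 : Nat) : Int))) = true := by
        simp only [beq_iff_eq, Prod.mk.injEq, not_and]
        intro _; push_cast; omega
      rw [List.erase_cons_tail hne]
      have ih' := ih (c + 1) m hm
      have hcast : c + 1 + (m : Int) = c + ((m + 1 : Nat) : Int) := by push_cast; ring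
      rw [hcast] at ih'
      exact (ih'.cons ((x, c))).trans (List.Perm.swap _ _ _)

-- loop invariant: the two states fail together, or carry the same time and a heap that is a
-- permutation of the (load, register) pairs
def pvRel (sa : Option (List (Int × Int) × Int)) (sb : Option (List Int × Int)) : Prop :=
  (sa = none ∧ sb = none) ∨
  ∃ q loads time, sa = some (q, time) ∧ sb = some (loads, time) ∧ q.Perm (pvPairs 0 loads)

theorem pvStep_rel {t : List Int} {sa sb} (i : Int) (h : pvRel sa sb) :
    pvRel (pvAStep t sa i) (pvBStep t sb i) := by
  rcases h with ⟨ha, hb⟩ | ⟨q, loads, time, ha, hb, hperm⟩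
  · subst ha; subst hb; exact Or.inl ⟨rfl, rfl⟩
  subst ha; subst hb
  cases loads with
  | nil =>
    have hq : q = [] := by simpa [pvPairs] using hperm.eq_nil
    subst hq
    simp [pvAStep, pvBStep, pvHeapPop, pvScan, PySem.List.pyGet?, PySem.List.pyIdx?, pvRel]
  | cons x xs =>
    obtain ⟨b', bi', hscan, hmemB, hallB⟩ := pvScan_spec x xs
    cases q with
    | nil => exact absurd (hperm.symm.eq_nil) (by simp [pvPairs])
    | cons y ys =>
      have ⟨hmemA, hallA⟩ := pvFoldlMin_spec y ys
      set m := ys.foldl pvLexMin y with hm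
      -- the heap minimum and the scan's choice coincide
      have hmeq : m = (b', bi') := by
        apply pvLe_antisymm
        · exact hallA _ (hperm.mem_iff.mpr hmemB)
        · exact hallB _ (hperm.mem_iff.mp hmemA)
      obtain ⟨kk, hkk, hpair⟩ := mem_pvPairs.mp hmemB
      have hb' : b' = (x :: xs)[kk] := by simpa using congrArg Prod.fst hpair
      have hbi' : bi' = (kk : Int) := by simpa using congrArg Prod.snd hpair
      have hget : PySem.List.pyGet? (x :: xs) bi' = some b' := by
        rw [hbi', PySem.List.pyGet?_natCast, List.getElem?_eq_getElem hkk, hb']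
      simp only [pvAStep, pvBStep, pvHeapPop, hscan, hget]
      cases hti : PySem.List.pyGet? t i with
      | none => exact Or.inl ⟨rfl, rfl⟩
      | some ti =>
        have htime : (if b' + ti > time then b' + ti else time) = max time (m.1 + ti) := by
          rw [hmeq]; simp only [max_def]; split_ifs <;> omega
        have hloads : PySem.List.pySetD (x :: xs) bi' (b' + ti) = (x :: xs).set kk (b' + ti) := by
          rw [hbi', PySem.List.pySetD_natCast]
        refine Or.inr ⟨(y :: ys).erase m ++ [(m.1 + ti, m.2)], (x :: xs).set kk (b' + ti),
          max time (m.1 + ti), rfl, ?_, ?_⟩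
        · show some (PySem.List.pySetD (x :: xs) bi' (b' + ti),
              if b' + ti > time then b' + ti else time) = _
          rw [hloads, htime]
        · -- pop-and-reinsert on the heap matches the in-place update of loads
          have hset := pvPairs_set_perm (x :: xs) 0 kk (b' + ti) hkk
          simp only [zero_add] at hset
          have hperm2 : ((y :: ys).erase m).Perm ((pvPairs 0 (x :: xs)).erase m) :=
            hperm.erase m
          have hxkk : (((x :: xs)[kk], (kk : Int)) : Int × Int) = m := by
            rw [hmeq, ← hb', ← hbi']
          have hm2 : ((m.1 + ti, m.2) : Int × Int) = (b' + ti, (kk : Int)) := by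
            rw [hmeq, hbi']
          refine (List.perm_append_singleton _ _).trans (List.Perm.trans ?_ hset.symm)
          rw [hm2, hxkk]
          exact hperm2.cons _

theorem pvFold_rel (t : List Int) (r : List Int) :
    ∀ sa sb, pvRel sa sb → pvRel (r.foldl (pvAStep t) sa) (r.foldl (pvBStep t) sb) := by
  induction r with
  | nil => intro sa sb h; exact h
  | cons i r ih => intro sa sb h; exact ih _ _ (pvStep_rel i h)

theorem pvPairs_replicate (m : Nat) (c : Int) :
    pvPairs c (List.replicate m (0 : Int)) =
      (PySem.List.pyRange c (c + m) 1).map (fun i => ((0 : Int), i)) := by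
  induction m generalizing c with
  | zero => simp [pvPairs, PySem.List.pyRange_one_eq_nil]
  | succ p ih =>
    rw [List.replicate_succ]
    have hcons : PySem.List.pyRange c (c + (p + 1 : Nat)) 1 =
        c :: PySem.List.pyRange (c + 1) (c + (p + 1 : Nat)) 1 :=
      PySem.List.pyRange_one_cons (by push_cast; omega)
    rw [hcons]
    simp only [pvPairs, List.map_cons, List.cons.injEq]
    refine ⟨trivial, ?_⟩
    rw [ih (c + 1)]
    congr 1
    push_cast; ring_nf

theorem pvInit_perm (k : Int) :
    ((PySem.List.pyRange 0 k 1).foldl (fun q i => q ++ [((0 : Int), i)]) []).Perm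
      (pvPairs 0 (List.replicate k.toNat (0 : Int))) := by
  rw [PySem.List.foldl_append_singleton_eq_map (f := fun i => ((0 : Int), i))]
  rw [pvPairs_replicate k.toNat 0]
  by_cases hk : 0 ≤ k
  · rw [show (0 : Int) + (k.toNat : Int) = k by omega]
    simp
  · rw [PySem.List.pyRange_one_eq_nil (by omega), PySem.List.pyRange_one_eq_nil (by omega)]
    simp

-- ===== VERDICT (by name: the statement is the Claim_ definition above) =====
theorem calculate_service_time_spec : Claim_equal_calculate_service_time := by
  intro n k t _ _
  unfold Spec_calculate_service_time calculate_service_time calculate_service_time_alt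
  have h := pvFold_rel t (PySem.List.pyRange 0 n 1)
    (some ((PySem.List.pyRange 0 k 1).foldl (fun q i => q ++ [((0 : Int), i)]) [], 0))
    (some (List.replicate k.toNat 0, 0))
    (Or.inr ⟨_, _, 0, rfl, rfl, pvInit_perm k⟩)
  rcases h with ⟨ha, hb⟩ | ⟨q, loads, time, ha, hb, _⟩ <;> rw [ha, hb]
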